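-- pv_equiv track=rewrite | github.com/oktaylor/algorithm_practice | 백준/Silver/1697. 숨바꼭질/숨바꼭질.py | bfs
-- ===== SOURCE A (Python) =====
-- from collections import deque
--
-- def bfs(start, end):
--     queue = deque([start])
--     line = [0] * 100001
--     while queue:
--         loc = queue.popleft()
--         if loc == end:
--             return line[loc]
--
--         for nex in [loc+1, loc-1, loc*2]:
--             if -1 < nex < 100001:
--                 if line[nex]==0 or line[nex] > line[loc]+1:
--                     queue.append(nex)
--                     line[nex] = line[loc]+1
-- ===== SOURCE B (Python) =====
-- def bfs(start, end):
--     # Level-synchronous BFS: a frontier list per depth and a visited set,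
--     # instead of a single deque with a per-node distance array.
--     frontier = [start]
--     visited = {start}
--     depth = 0
--     while frontier:
--         if end in frontier:
--             return depth
--         nxt = []
--         for loc in frontier:
--             for nex in (loc + 1, loc - 1, loc * 2):
--                 if 0 <= nex < 100001 and nex not in visited:
--                     visited.add(nex)
--                     nxt.append(nex)
--         frontier = nxt
--         depth += 1
-- ===== Notes on version B (the rewrite author's own statement) =====
-- stated objective: alternative
-- what changed: Replaces the single-deque BFS with a 100001-entry distance array and a relaxation test by a level-synchronous BFS that keeps a per-depth frontier list, a visited set and an explicit depth counter.
import Mathlib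
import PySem

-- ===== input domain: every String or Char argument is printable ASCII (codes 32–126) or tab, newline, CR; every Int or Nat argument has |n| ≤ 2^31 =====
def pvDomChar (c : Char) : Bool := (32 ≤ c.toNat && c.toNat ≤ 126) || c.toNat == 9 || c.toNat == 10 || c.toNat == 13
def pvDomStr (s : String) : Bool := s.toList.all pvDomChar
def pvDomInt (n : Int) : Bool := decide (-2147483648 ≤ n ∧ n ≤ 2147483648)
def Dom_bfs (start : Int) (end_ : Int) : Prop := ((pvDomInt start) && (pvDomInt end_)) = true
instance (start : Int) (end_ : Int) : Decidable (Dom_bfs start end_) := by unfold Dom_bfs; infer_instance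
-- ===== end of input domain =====

-- B replaces A's single-deque BFS over a 100001-entry distance array by a
-- level-synchronous BFS (frontier list per depth, visited set, depth counter).
-- Both ports are proved to return A's value on every input where A returns an int.

-- ===== PORT A =====

/-- Python list read `line[i]` of the length-100001 list of ints, with Python's
negative-index wraparound (exact for `-100001 ≤ i ≤ 100000`, the only reads
A performs on inputs admitted by `Pre_bfs`). The list, initially `[0] * 100001`
and written only at in-range indices, is modelled by a hash map defaulting
to 0 (the initial content of every cell). -/
def pvLineRead (line : Std.HashMap Int Int) (i : Int) : Int :=
  if i < 0 then line.getD (i + 100001) 0 else line.getD i 0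

/-- A's `deque` with O(1) `popleft`/`append`: (front, reversed back);
the queue it represents is `front ++ back.reverse`. -/
def pvPop (q : List Int × List Int) : Option (Int × (List Int × List Int)) :=
  match q with
  | (x :: f, b) => some (x, (f, b))
  | ([], b) =>
    match b.reverse with
    | [] => none
    | x :: f => some (x, (f, []))

/-- One iteration of A's inner `for nex in [loc+1, loc-1, loc*2]` loop:
state is (queue-after-the-popped-head, line). `queue.append(nex)` pushes on
the reversed back; `line[nex] = ...` writes only under the guard
`-1 < nex < 100001`, so a plain insert is exact. -/
def pvStepA (loc : Int) (ql : (List Int × List Int) × Std.HashMap Int Int) (nex : Int) :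
    (List Int × List Int) × Std.HashMap Int Int :=
  if -1 < nex ∧ nex < 100001 then
    if pvLineRead ql.2 nex = 0 ∨ pvLineRead ql.2 nex > pvLineRead ql.2 loc + 1 then
      ((ql.1.1, nex :: ql.1.2), ql.2.insert nex (pvLineRead ql.2 loc + 1))
    else ql
  else ql

/-- A's `while queue:` loop; `none` = the Python falls off the loop (returns None). -/
def pvGoA (fuel : Nat) (queue : List Int × List Int) (line : Std.HashMap Int Int) (end_ : Int) : Option Int :=
  match fuel with
  | 0 => none
  | fuel + 1 =>
    match pvPop queue with
    | none => none
    | some (loc, queue) =>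
      if loc = end_ then some (pvLineRead line loc)
      else
        let ql := [loc + 1, loc - 1, loc * 2].foldl (pvStepA loc) (queue, line)
        pvGoA fuel ql.1 ql.2 end_

def bfs (start : Int) (end_ : Int) : Int :=
  (pvGoA 1000000 ([start], []) ∅ end_).getD 0

-- ===== PORT B =====

/-- One iteration of B's inner `for nex in (loc+1, loc-1, loc*2)` loop:
state is (visited, nxt). `visited` is only inserted into and membership-tested,
so a hash set is exact; `nxt` collects Python's O(1) list appends in reverse
(one `List.reverse` per level restores the order). -/
def pvStepB (vb : Std.HashSet Int × List Int) (nex : Int) : Std.HashSet Int × List Int :=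
  if (0 ≤ nex ∧ nex < 100001) ∧ ¬ vb.1.contains nex then
    (vb.1.insert nex, nex :: vb.2)
  else vb

/-- B's `for loc in frontier:` double loop building (visited, reversed nxt). -/
def pvLevelB (frontier : List Int) (visited : Std.HashSet Int) : Std.HashSet Int × List Int :=
  frontier.foldl (fun vb loc => [loc + 1, loc - 1, loc * 2].foldl pvStepB vb) (visited, [])

/-- B's `while frontier:` loop; `none` = the Python falls off the loop (returns None). -/
def pvGoB (fuel : Nat) (frontier : List Int) (visited : Std.HashSet Int) (depth : Int) (end_ : Int) : Option Int :=
  match fuel with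
  | 0 => none
  | fuel + 1 =>
    match frontier with
    | [] => none
    | _ :: _ =>
      if frontier.contains end_ then some depth
      else
        let vb := pvLevelB frontier visited
        pvGoB fuel vb.2.reverse vb.1 (depth + 1) end_

def bfs_alt (start : Int) (end_ : Int) : Int :=
  (pvGoB 1000000 [start] ((∅ : Std.HashSet Int).insert start) 0 end_).getD 0

-- ===== PRECONDITION & SPEC =====

-- Pre_bfs is exactly the set of inputs on which the Python A returns an int:
-- start == end with start a valid (possibly negative, wrapping) index of the
-- length-100001 list, or start ≠ end with end in [0,100000] and start in
-- [-1,100000] (so that end is reachable). Everywhere else A raises IndexError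
-- or returns None (no int value).
def Pre_bfs (start : Int) (end_ : Int) : Prop :=
  (start = end_ ∧ -100001 ≤ start ∧ start ≤ 100000) ∨
  (start ≠ end_ ∧ 0 ≤ end_ ∧ end_ ≤ 100000 ∧ -1 ≤ start ∧ start ≤ 100000)
instance (start : Int) (end_ : Int) : Decidable (Pre_bfs start end_) := by
  unfold Pre_bfs; infer_instance

def pvWitness_bfs : Int × Int := (3, 11)

def Spec_bfs (start : Int) (end_ : Int) (out : Int) : Prop := out = bfs_alt start end_
instance (start : Int) (end_ : Int) (out : Int) : Decidable (Spec_bfs start end_ out) := by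
  unfold Spec_bfs; infer_instance

-- ===== CLAIM (what is proved, stated in full; the proofs are below) =====
def Claim_equal_bfs : Prop := ∀ (start : Int) (end_ : Int), Dom_bfs start end_ → Pre_bfs start end_ → Spec_bfs start end_ (bfs start end_)

-- ===== LEMMAS AND PROOFS =====
-- ---------- reference forms of the two ports ----------
-- The ports above use O(1) structures (hash map / hash set / two-list deque) for
-- the Python structures with O(1) operations. The proofs work on the following
-- step-identical reference forms (plain function / PySem.Set / plain list), and
-- bfs_eq_S / bfs_alt_eq_S prove each port equal to its reference form.

/-- Python list read `line[i]` of the length-100001 list, with Python's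
negative-index wraparound (exact for `-100001 ≤ i ≤ 100000`, the only reads
A performs on inputs admitted by `Pre_bfs`). -/
def pvLineReadS (line : Int → Int) (i : Int) : Int :=
  if i < 0 then line (i + 100001) else line i

/-- One iteration of A's inner `for nex in [loc+1, loc-1, loc*2]` loop:
state is (queue-after-the-popped-head, line). Writes `line[nex]` only under
the guard `-1 < nex < 100001`, so a plain pointwise update is exact. -/
def pvStepAS (loc : Int) (ql : List Int × (Int → Int)) (nex : Int) : List Int × (Int → Int) :=
  if -1 < nex ∧ nex < 100001 then
    if pvLineReadS ql.2 nex = 0 ∨ pvLineReadS ql.2 nex > pvLineReadS ql.2 loc + 1 then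
      (ql.1 ++ [nex], fun j => if j = nex then pvLineReadS ql.2 loc + 1 else ql.2 j)
    else ql
  else ql

/-- A's `while queue:` loop; `none` = the Python falls off the loop (returns None). -/
def pvGoAS (fuel : Nat) (queue : List Int) (line : Int → Int) (end_ : Int) : Option Int :=
  match fuel with
  | 0 => none
  | fuel + 1 =>
    match queue with
    | [] => none
    | loc :: queue =>
      if loc = end_ then some (pvLineReadS line loc)
      else
        let ql := [loc + 1, loc - 1, loc * 2].foldl (pvStepAS loc) (queue, line)
        pvGoAS fuel ql.1 ql.2 end_



/-- One iteration of B's inner `for nex in (loc+1, loc-1, loc*2)` loop: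
state is (visited, nxt). -/
def pvStepBS (vb : PySem.Set Int × List Int) (nex : Int) : PySem.Set Int × List Int :=
  if (0 ≤ nex ∧ nex < 100001) ∧ ¬ nex ∈ vb.1 then
    (PySem.Set.add vb.1 nex, vb.2 ++ [nex])
  else vb

/-- B's `for loc in frontier:` double loop building (visited, nxt). -/
def pvLevelBS (frontier : List Int) (visited : PySem.Set Int) : PySem.Set Int × List Int :=
  frontier.foldl (fun vb loc => [loc + 1, loc - 1, loc * 2].foldl pvStepBS vb) (visited, [])

/-- B's `while frontier:` loop; `none` = the Python falls off the loop (returns None). -/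
def pvGoBS (fuel : Nat) (frontier : List Int) (visited : PySem.Set Int) (depth : Int) (end_ : Int) : Option Int :=
  match fuel with
  | 0 => none
  | fuel + 1 =>
    match frontier with
    | [] => none
    | _ :: _ =>
      if frontier.contains end_ then some depth
      else
        let vb := pvLevelBS frontier visited
        pvGoBS fuel vb.2 vb.1 (depth + 1) end_


-- ---------- each fast port equals its reference form ----------

/-- the queue a (front, reversed back) pair represents -/
def pvAbsQ (q : List Int × List Int) : List Int := q.1 ++ q.2.reverse

lemma pvPop_eq (qF : List Int × List Int) :
    (pvPop qF = none ∧ pvAbsQ qF = []) ∨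
    (∃ x qF', pvPop qF = some (x, qF') ∧ pvAbsQ qF = x :: pvAbsQ qF') := by
  rcases qF with ⟨f, b⟩
  cases f with
  | cons x f' => exact Or.inr ⟨x, (f', b), rfl, rfl⟩
  | nil =>
    cases hb : b.reverse with
    | nil => exact Or.inl ⟨by simp only [pvPop]; rw [hb], by simp [pvAbsQ, hb]⟩
    | cons x r =>
      refine Or.inr ⟨x, (r, []), ?_, ?_⟩
      · simp only [pvPop]; rw [hb]
      · simp [pvAbsQ, hb]

lemma lineRead_eq {lineS : Int → Int} {lineF : Std.HashMap Int Int}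
    (h : ∀ x, lineF.getD x 0 = lineS x) (i : Int) :
    pvLineRead lineF i = pvLineReadS lineS i := by
  rw [pvLineRead, pvLineReadS]
  split <;> rw [h]

/-- the simulation relation between a fast A state and a reference A state -/
def pvRelA (qlF : (List Int × List Int) × Std.HashMap Int Int)
    (qlS : List Int × (Int → Int)) : Prop :=
  pvAbsQ qlF.1 = qlS.1 ∧ ∀ x, qlF.2.getD x 0 = qlS.2 x

lemma stepA_eq {loc nex : Int} {qlF : (List Int × List Int) × Std.HashMap Int Int}
    {qlS : List Int × (Int → Int)} (h : pvRelA qlF qlS) :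
    pvRelA (pvStepA loc qlF nex) (pvStepAS loc qlS nex) := by
  obtain ⟨hq, hl⟩ := h
  unfold pvStepA pvStepAS
  rw [lineRead_eq hl nex, lineRead_eq hl loc]
  split_ifs with h1 h2
  · refine ⟨?_, ?_⟩
    · simp [pvAbsQ, pvRelA] at hq ⊢
      rw [← List.append_assoc, hq]
    · intro x
      rw [Std.HashMap.getD_insert]
      by_cases hx : x = nex
      · simp [hx]
      · simp only [beq_iff_eq]
        rw [if_neg (fun hc => hx hc.symm), if_neg hx]
        exact hl x
  · exact ⟨hq, hl⟩
  · exact ⟨hq, hl⟩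

lemma foldA_eq (loc : Int) : ∀ (ns : List Int)
    (qlF : (List Int × List Int) × Std.HashMap Int Int) (qlS : List Int × (Int → Int)),
    pvRelA qlF qlS →
    pvRelA (ns.foldl (pvStepA loc) qlF) (ns.foldl (pvStepAS loc) qlS) := by
  intro ns
  induction ns with
  | nil => intro _ _ h; exact h
  | cons nex ns ih =>
    intro qlF qlS h
    rw [List.foldl_cons, List.foldl_cons]
    exact ih _ _ (stepA_eq h)

lemma goA_eq (e : Int) : ∀ (fuel : Nat) (qF : List Int × List Int)
    (lineF : Std.HashMap Int Int) (qS : List Int) (lineS : Int → Int),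
    pvAbsQ qF = qS → (∀ x, lineF.getD x 0 = lineS x) →
    pvGoA fuel qF lineF e = pvGoAS fuel qS lineS e := by
  intro fuel
  induction fuel with
  | zero => intro _ _ _ _ _ _; rfl
  | succ f ih =>
    intro qF lineF qS lineS hq hl
    rcases pvPop_eq qF with ⟨hpop, habs⟩ | ⟨loc, qF', hpop, habs⟩
    · have hqS : qS = [] := by rw [← hq, habs]
      subst hqS
      simp only [pvGoA, pvGoAS]
      rw [hpop]
    · have hqS : qS = loc :: pvAbsQ qF' := by rw [← hq, habs]
      subst hqS
      simp only [pvGoA, pvGoAS]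
      rw [hpop]
      dsimp only
      by_cases hle : loc = e
      · rw [if_pos hle, if_pos hle, lineRead_eq hl]
      · rw [if_neg hle, if_neg hle]
        obtain ⟨hq', hl'⟩ := foldA_eq loc [loc + 1, loc - 1, loc * 2]
          (qF', lineF) (pvAbsQ qF', lineS) ⟨rfl, hl⟩
        exact ih _ _ _ _ hq' hl'

lemma bfs_eq_S (s e : Int) :
    bfs s e = (pvGoAS 1000000 [s] (fun _ => 0) e).getD 0 := by
  unfold bfs
  rw [goA_eq e 1000000 ([s], []) ∅ [s] (fun _ => 0) (by simp [pvAbsQ])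
    (fun x => Std.HashMap.getD_empty)]

/-- the simulation relation between a fast B state and a reference B state -/
def pvRelB (vbF : Std.HashSet Int × List Int) (vbS : PySem.Set Int × List Int) : Prop :=
  (∀ x, vbF.1.contains x = true ↔ x ∈ vbS.1) ∧ vbF.2.reverse = vbS.2

lemma stepB_eq {nex : Int} {vbF : Std.HashSet Int × List Int}
    {vbS : PySem.Set Int × List Int} (h : pvRelB vbF vbS) :
    pvRelB (pvStepB vbF nex) (pvStepBS vbS nex) := by
  obtain ⟨hv, ha⟩ := h
  unfold pvStepB pvStepBS
  by_cases hc : (0 ≤ nex ∧ nex < 100001)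
  · by_cases hm : nex ∈ vbS.1
    · rw [if_neg (fun hcc => hcc.2 ((hv nex).2 hm)), if_neg (by intro hcc; exact hcc.2 hm)]
      exact ⟨hv, ha⟩
    · rw [if_pos ⟨hc, fun hcc => hm ((hv nex).1 hcc)⟩, if_pos ⟨hc, hm⟩]
      refine ⟨?_, by simp [ha]⟩
      intro x
      rw [Std.HashSet.contains_insert]
      rw [PySem.Set.mem_add]
      constructor
      · intro hx
        rcases Bool.or_eq_true_iff.1 hx with hx | hx
        · exact Or.inr (beq_iff_eq.1 hx).symm
        · exact Or.inl ((hv x).1 hx)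
      · intro hx
        rcases hx with hx | hx
        · exact Bool.or_eq_true_iff.2 (Or.inr ((hv x).2 hx))
        · exact Bool.or_eq_true_iff.2 (Or.inl (beq_iff_eq.2 hx.symm))
  · rw [if_neg (fun hcc => hc hcc.1), if_neg (fun hcc => hc hcc.1)]
    exact ⟨hv, ha⟩

lemma levelB_eq : ∀ (f : List Int) (vbF : Std.HashSet Int × List Int)
    (vbS : PySem.Set Int × List Int), pvRelB vbF vbS →
    pvRelB (f.foldl (fun vb loc => [loc + 1, loc - 1, loc * 2].foldl pvStepB vb) vbF)
      (f.foldl (fun vb loc => [loc + 1, loc - 1, loc * 2].foldl pvStepBS vb) vbS) := by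
  intro f
  induction f with
  | nil => intro _ _ h; exact h
  | cons loc f ih =>
    intro vbF vbS h
    rw [List.foldl_cons, List.foldl_cons]
    refine ih _ _ ?_
    have : ∀ (ns : List Int) vbF vbS, pvRelB vbF vbS →
        pvRelB (ns.foldl pvStepB vbF) (ns.foldl pvStepBS vbS) := by
      intro ns
      induction ns with
      | nil => intro _ _ h; exact h
      | cons x ns ih2 =>
        intro vbF vbS h
        rw [List.foldl_cons, List.foldl_cons]
        exact ih2 _ _ (stepB_eq h)
    exact this [loc + 1, loc - 1, loc * 2] vbF vbS h

lemma goB_eq (e : Int) : ∀ (fuel : Nat) (f : List Int) (visF : Std.HashSet Int)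
    (visS : PySem.Set Int) (depth : Int),
    (∀ x, visF.contains x = true ↔ x ∈ visS) →
    pvGoB fuel f visF depth e = pvGoBS fuel f visS depth e := by
  intro fuel
  induction fuel with
  | zero => intro _ _ _ _ _; rfl
  | succ fu ih =>
    intro f visF visS depth hv
    cases f with
    | nil => rfl
    | cons x rest =>
      simp only [pvGoB, pvGoBS]
      by_cases hcont : (x :: rest).contains e
      · rw [if_pos hcont, if_pos hcont]
      · rw [if_neg hcont, if_neg hcont]
        obtain ⟨hv', ha'⟩ := levelB_eq (x :: rest) (visF, []) (visS, []) ⟨hv, rfl⟩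
        unfold pvLevelB pvLevelBS
        rw [ha']
        exact ih _ _ _ _ hv'

lemma bfs_alt_eq_S (s e : Int) :
    bfs_alt s e = (pvGoBS 1000000 [s] (PySem.Set.ofList [s]) 0 e).getD 0 := by
  unfold bfs_alt
  rw [goB_eq e 1000000 [s] ((∅ : Std.HashSet Int).insert s) (PySem.Set.ofList [s]) 0]
  intro x
  rw [Std.HashSet.contains_insert]
  simp [PySem.Set.ofList]
  exact eq_comm

/-- in-range nodes of the hide-and-seek board -/
def pvRng (x : Int) : Prop := 0 ≤ x ∧ x < 100001

/-- (frontier, visited) per BFS level, exactly as B computes them. -/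
def pvFV (s : Int) : Nat → List Int × List Int
  | 0 => ([s], [s])
  | d + 1 =>
    let p := pvFV s d
    ((pvLevelBS p.1 p.2).2, (pvLevelBS p.1 p.2).1)

def pvF (s : Int) (d : Nat) : List Int := (pvFV s d).1
def pvV (s : Int) (d : Nat) : List Int := (pvFV s d).2

lemma pvF_succ (s : Int) (d : Nat) : pvF s (d + 1) = (pvLevelBS (pvF s d) (pvV s d)).2 := rfl
lemma pvV_succ (s : Int) (d : Nat) : pvV s (d + 1) = (pvLevelBS (pvF s d) (pvV s d)).1 := rfl

/-- `l'` is `l` with one copy of `s` inserted somewhere. -/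
def pvIns (s : Int) (l l' : List Int) : Prop := ∃ a b, l = a ++ b ∧ l' = a ++ s :: b

lemma pvIns_cons {s x : Int} {l l' : List Int} (h : pvIns s l l') :
    pvIns s (x :: l) (x :: l') := by
  obtain ⟨a, b, h1, h2⟩ := h
  exact ⟨x :: a, b, by simp [h1], by simp [h2]⟩

lemma pvIns_append {s : Int} {l l' m : List Int} (h : pvIns s l l') :
    pvIns s (l ++ m) (l' ++ m) := by
  obtain ⟨a, b, h1, h2⟩ := h
  exact ⟨a, b ++ m, by simp [h1], by simp [h2]⟩

lemma pvIns_head {s : Int} {l : List Int} : pvIns s l (s :: l) := ⟨[], l, rfl, rfl⟩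

lemma pvIns_ne_self {s : Int} {l : List Int} : ¬ pvIns s l l := by
  rintro ⟨a, b, h1, h2⟩
  have := congrArg List.length h2
  simp [h1] at this

-- ---------- generic facts about the B fold ----------

lemma stepB_ext (vb : PySem.Set Int × List Int) (x : Int) :
    ∃ δ, pvStepBS vb x = (vb.1 ++ δ, vb.2 ++ δ) := by
  by_cases h : ((0 ≤ x ∧ x < 100001) ∧ ¬ x ∈ vb.1)
  · refine ⟨[x], ?_⟩
    unfold pvStepBS
    rw [if_pos h, PySem.Set.add_of_not_mem h.2]
  · exact ⟨[], by unfold pvStepBS; rw [if_neg h]; simp⟩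

lemma foldB_ext (ns : List Int) : ∀ (vb : PySem.Set Int × List Int),
    ∃ δ, ns.foldl pvStepBS vb = (vb.1 ++ δ, vb.2 ++ δ) := by
  induction ns with
  | nil => intro vb; exact ⟨[], by simp⟩
  | cons x ns ih =>
    intro vb
    obtain ⟨δ₁, h₁⟩ := stepB_ext vb x
    obtain ⟨δ₂, h₂⟩ := ih (pvStepBS vb x)
    exact ⟨δ₁ ++ δ₂, by rw [List.foldl_cons, h₂, h₁]; simp⟩

lemma levelB_fold_ext (f : List Int) : ∀ (vb : PySem.Set Int × List Int),
    ∃ δ, f.foldl (fun vb loc => [loc + 1, loc - 1, loc * 2].foldl pvStepBS vb) vb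
      = (vb.1 ++ δ, vb.2 ++ δ) := by
  induction f with
  | nil => intro vb; exact ⟨[], by simp⟩
  | cons x f ih =>
    intro vb
    obtain ⟨δ₁, h₁⟩ := foldB_ext [x + 1, x - 1, x * 2] vb
    obtain ⟨δ₂, h₂⟩ := ih ([x + 1, x - 1, x * 2].foldl pvStepBS vb)
    exact ⟨δ₁ ++ δ₂, by rw [List.foldl_cons, h₂, h₁]; simp⟩

lemma levelB_ext (f vis : List Int) :
    (pvLevelBS f vis).1 = vis ++ (pvLevelBS f vis).2 := by
  obtain ⟨δ, hδ⟩ := levelB_fold_ext f (vis, ([] : List Int))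
  unfold pvLevelBS
  rw [hδ]; simp

lemma pvV_decomp (s : Int) (d : Nat) : pvV s (d + 1) = pvV s d ++ pvF s (d + 1) := by
  rw [pvV_succ, pvF_succ, levelB_ext]

lemma foldB_vis_mono {ns : List Int} {vb : PySem.Set Int × List Int} {x : Int}
    (h : x ∈ vb.1) : x ∈ (ns.foldl pvStepBS vb).1 := by
  obtain ⟨δ, hδ⟩ := foldB_ext ns vb
  rw [hδ]; exact List.mem_append_left _ h

lemma levelB_vis_mono {f : List Int} {vb : PySem.Set Int × List Int} {x : Int}
    (h : x ∈ vb.1) :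
    x ∈ (f.foldl (fun vb loc => [loc + 1, loc - 1, loc * 2].foldl pvStepBS vb) vb).1 := by
  obtain ⟨δ, hδ⟩ := levelB_fold_ext f vb
  rw [hδ]; exact List.mem_append_left _ h

/-- after the inner fold over `ns`, every in-range member of `ns` is visited. -/
lemma foldB_covers {ns : List Int} : ∀ {vb : PySem.Set Int × List Int} {y : Int},
    y ∈ ns → pvRng y → y ∈ (ns.foldl pvStepBS vb).1 := by
  induction ns with
  | nil => intro vb y h _; simp at h
  | cons x ns ih =>
    intro vb y h hy
    rcases List.mem_cons.1 h with rfl | h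
    · rw [List.foldl_cons]
      apply foldB_vis_mono
      by_cases hv : y ∈ vb.1
      · obtain ⟨δ, hδ⟩ := stepB_ext vb y
        rw [hδ]; exact List.mem_append_left _ hv
      · unfold pvStepBS
        rw [if_pos ⟨⟨hy.1, hy.2⟩, hv⟩, PySem.Set.add_of_not_mem hv]
        simp
    · rw [List.foldl_cons]; exact ih h hy

/-- processing a frontier containing `x` visits every in-range neighbour of `x`. -/
lemma levelB_covers {f vis : List Int} {x y : Int}
    (hx : x ∈ f) (hy : y ∈ [x + 1, x - 1, x * 2]) (hr : pvRng y) :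
    y ∈ (pvLevelBS f vis).1 := by
  obtain ⟨f1, f2, rfl⟩ := List.append_of_mem hx
  unfold pvLevelBS
  rw [List.foldl_append, List.foldl_cons]
  exact levelB_vis_mono (foldB_covers hy hr)

-- ---------- structure of the level sets ----------

lemma pvV_zero (s : Int) : pvV s 0 = [s] := rfl
lemma pvF_zero (s : Int) : pvF s 0 = [s] := rfl

lemma pvV_mono_succ {s : Int} {d : Nat} {x : Int} (h : x ∈ pvV s d) :
    x ∈ pvV s (d + 1) := by
  rw [pvV_decomp]; exact List.mem_append_left _ h

lemma pvV_mono {s : Int} {d e : Nat} (hde : d ≤ e) {x : Int} (h : x ∈ pvV s d) :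
    x ∈ pvV s e := by
  induction e with
  | zero => simpa [Nat.le_zero.1 hde] using h
  | succ e ih =>
    rcases Nat.le_succ_iff.1 hde with h' | rfl
    · exact pvV_mono_succ (ih h')
    · exact h

lemma s_mem_pvV (s : Int) (d : Nat) : s ∈ pvV s d :=
  pvV_mono (Nat.zero_le d) (by simp [pvV_zero])

lemma pvF_sub_pvV {s : Int} {d : Nat} {x : Int} (h : x ∈ pvF s d) : x ∈ pvV s d := by
  cases d with
  | zero => simpa [pvV_zero, pvF_zero] using h
  | succ d => rw [pvV_decomp]; exact List.mem_append_right _ h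

lemma mem_pvV_iff {s : Int} {d : Nat} {x : Int} :
    x ∈ pvV s d ↔ ∃ e ≤ d, x ∈ pvF s e := by
  constructor
  · intro h
    induction d with
    | zero =>
      refine ⟨0, le_rfl, ?_⟩
      have hx : x = s := by simpa [pvV_zero] using h
      simp [pvF_zero, hx]
    | succ d ih =>
      rw [pvV_decomp] at h
      rcases List.mem_append.1 h with h | h
      · obtain ⟨e, he, hx⟩ := ih h
        exact ⟨e, Nat.le_succ_of_le he, hx⟩
      · exact ⟨d + 1, le_rfl, h⟩
  · rintro ⟨e, he, hx⟩
    exact pvV_mono he (pvF_sub_pvV hx)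

/-- closure: an in-range neighbour of a node of `V d` is in `V (d+1)`. -/
lemma pvV_closure {s : Int} {d : Nat} {x y : Int} (hx : x ∈ pvV s d)
    (hy : y ∈ [x + 1, x - 1, x * 2]) (hr : pvRng y) : y ∈ pvV s (d + 1) := by
  obtain ⟨e, he, hxe⟩ := mem_pvV_iff.1 hx
  have : y ∈ pvV s (e + 1) := by
    rw [pvV_succ]; exact levelB_covers hxe hy hr
  exact pvV_mono (by omega) this

/-- walking by ±1 steps: reachability of every in-range cell. -/
lemma pvV_steps {s : Int} : ∀ (n : Nat) (d : Nat) (x y : Int), x ∈ pvV s d →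
    0 ≤ x → x ≤ 100000 → 0 ≤ y → y ≤ 100000 → (y - x).natAbs ≤ n →
    y ∈ pvV s (d + n) := by
  intro n
  induction n with
  | zero => intro d x y hx _ _ _ _ h; have : y = x := by omega
            simpa [this] using hx
  | succ n ih =>
    intro d x y hx hx0 hx1 hy0 hy1 h
    by_cases hxy : y = x
    · subst hxy; exact pvV_mono (by omega) hx
    · rcases lt_or_gt_of_ne hxy with hlt | hgt
      · have h1 : x - 1 ∈ pvV s (d + 1) :=
          pvV_closure hx (by simp) ⟨by omega, by omega⟩
        have := ih (d + 1) (x - 1) y h1 (by omega) (by omega) hy0 hy1 (by omega)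
        simpa [Nat.add_assoc, Nat.add_comm 1 n] using this
      · have h1 : x + 1 ∈ pvV s (d + 1) :=
          pvV_closure hx (by simp) ⟨by omega, by omega⟩
        have := ih (d + 1) (x + 1) y h1 (by omega) (by omega) hy0 hy1 (by omega)
        simpa [Nat.add_assoc, Nat.add_comm 1 n] using this

/-- every admitted `end` is reached within 100001 levels. -/
lemma pvV_reach {s e : Int} (hs : -1 ≤ s) (hs1 : s ≤ 100000)
    (he0 : 0 ≤ e) (he1 : e ≤ 100000) : e ∈ pvV s 100001 := by
  by_cases h0 : 0 ≤ s
  · have := pvV_steps (s := s) 100000 0 s e (by simp [pvV_zero]) h0 hs1 he0 he1 (by omega)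
    exact pvV_mono (by omega) this
  · have hs' : s = -1 := by omega
    subst hs'
    have h1 : (0 : Int) ∈ pvV (-1) 1 :=
      pvV_closure (x := -1) (y := 0) (by simp [pvV_zero]) (by norm_num) ⟨le_rfl, by norm_num⟩
    have := pvV_steps (s := (-1 : Int)) 100000 1 0 e h1 le_rfl (by norm_num) he0 he1 (by omega)
    simpa using this

-- ---------- freshness / nodup / bounds ----------

lemma foldB_acc_new {x : Int} {ns : List Int} : ∀ {vb : PySem.Set Int × List Int},
    x ∈ (ns.foldl pvStepBS vb).2 → x ∈ vb.2 ∨ (pvRng x ∧ x ∉ vb.1) := by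
  induction ns with
  | nil => intro vb h; exact Or.inl h
  | cons n ns ih =>
    intro vb h
    rw [List.foldl_cons] at h
    rcases ih h with h' | h'
    · by_cases hc : ((0 ≤ n ∧ n < 100001) ∧ ¬ n ∈ vb.1)
      · rw [pvStepBS, if_pos hc] at h'
        simp only [List.mem_append, List.mem_singleton] at h'
        rcases h' with h' | rfl
        · exact Or.inl h'
        · exact Or.inr ⟨⟨hc.1.1, hc.1.2⟩, hc.2⟩
      · rw [pvStepBS, if_neg hc] at h'
        exact Or.inl h'
    · obtain ⟨δ, hδ⟩ := stepB_ext vb n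
      rw [hδ] at h'
      exact Or.inr ⟨h'.1, fun hx => h'.2 (List.mem_append_left _ hx)⟩

lemma levelB_fold_acc_new {x : Int} {f : List Int} : ∀ {vb : PySem.Set Int × List Int},
    x ∈ (f.foldl (fun vb loc => [loc + 1, loc - 1, loc * 2].foldl pvStepBS vb) vb).2 →
    x ∈ vb.2 ∨ (pvRng x ∧ x ∉ vb.1) := by
  induction f with
  | nil => intro vb h; exact Or.inl h
  | cons a f ih =>
    intro vb h
    rw [List.foldl_cons] at h
    rcases ih h with h' | h'
    · rcases foldB_acc_new h' with h'' | h''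
      · exact Or.inl h''
      · exact Or.inr h''
    · obtain ⟨δ, hδ⟩ := foldB_ext [a + 1, a - 1, a * 2] vb
      rw [hδ] at h'
      exact Or.inr ⟨h'.1, fun hx => h'.2 (List.mem_append_left _ hx)⟩

lemma pvF_fresh {s : Int} {d : Nat} {x : Int} (h : x ∈ pvF s (d + 1)) :
    pvRng x ∧ x ∉ pvV s d := by
  rw [pvF_succ] at h
  rcases levelB_fold_acc_new (vb := (pvV s d, ([] : List Int))) h with h' | h'
  · simp at h'
  · exact h'

lemma pvF_ne_s {s : Int} {d : Nat} {x : Int} (h : x ∈ pvF s (d + 1)) : x ≠ s := by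
  intro heq
  exact (pvF_fresh h).2 (by rw [heq]; exact s_mem_pvV s d)

lemma mem_pvV_level {s : Int} {d : Nat} {x : Int} (h : x ∈ pvV s d) (hx : x ≠ s) :
    ∃ e, 1 ≤ e ∧ e ≤ d ∧ x ∈ pvF s e := by
  obtain ⟨e, he, hxe⟩ := mem_pvV_iff.1 h
  cases e with
  | zero => exact absurd (by simpa [pvF_zero] using hxe) hx
  | succ e => exact ⟨e + 1, by omega, he, hxe⟩

lemma pvVis_len {s : Int} {vis : List Int} (hnd : vis.Nodup)
    (hsub : ∀ x ∈ vis, x = s ∨ pvRng x) : vis.length ≤ 100002 := by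
  classical
  have hsubset : vis.toFinset ⊆ insert s (Finset.Icc (0 : Int) 100000) := by
    intro x hx
    rcases hsub x (List.mem_toFinset.1 hx) with rfl | hr
    · exact Finset.mem_insert_self _ _
    · exact Finset.mem_insert_of_mem (Finset.mem_Icc.2 ⟨hr.1, by have := hr.2; omega⟩)
  have h1 : vis.toFinset.card = vis.length := List.toFinset_card_of_nodup hnd
  have h2 := Finset.card_le_card hsubset
  have h3 : (insert s (Finset.Icc (0 : Int) 100000)).card ≤ 100002 := by
    have := Finset.card_insert_le s (Finset.Icc (0 : Int) 100000)
    have hc : (Finset.Icc (0 : Int) 100000).card = 100001 := by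
      rw [Int.card_Icc]; rfl
    omega
  omega

-- ---------- nonemptiness of frontiers up to D ----------

lemma pvF_empty_succ {s : Int} {d : Nat} (h : pvF s d = []) : pvF s (d + 1) = [] := by
  rw [pvF_succ, h]
  rfl

lemma pvF_nonempty_le {s : Int} {D : Nat} {e : Int} (hDF : e ∈ pvF s D) :
    ∀ d, d ≤ D → pvF s d ≠ [] := by
  intro d hd hempty
  have : ∀ k, pvF s (d + k) = [] := by
    intro k
    induction k with
    | zero => simpa using hempty
    | succ k ih => exact pvF_empty_succ ih
  have hD : pvF s D = [] := by
    have := this (D - d)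
    rwa [Nat.add_sub_cancel' hd] at this
  rw [hD] at hDF
  simp at hDF

-- ---------- the B port returns D ----------

lemma goB_run {s e : Int} {D : Nat} (hDF : e ∈ pvF s D) (hDmin : ∀ k, k < D → e ∉ pvV s k) :
    ∀ gap d fuel, d + gap = D → gap + 1 ≤ fuel →
    pvGoBS fuel (pvF s d) (pvV s d) (d : Int) e = some ((D : Nat) : Int) := by
  intro gap
  induction gap with
  | zero =>
    intro d fuel hd hfuel
    have hdD : d = D := by omega
    subst hdD
    obtain ⟨f, rfl⟩ : ∃ f, fuel = f + 1 := ⟨fuel - 1, by omega⟩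
    cases hF : pvF s d with
    | nil => rw [hF] at hDF; simp at hDF
    | cons a l =>
      rw [hF] at hDF
      simp only [pvGoBS]
      rw [if_pos (List.elem_eq_true_of_mem hDF)]
  | succ gap ih =>
    intro d fuel hd hfuel
    obtain ⟨f, rfl⟩ : ∃ f, fuel = f + 1 := ⟨fuel - 1, by omega⟩
    have hne : pvF s d ≠ [] := pvF_nonempty_le hDF d (by omega)
    cases hF : pvF s d with
    | nil => exact absurd hF hne
    | cons a l =>
      simp only [pvGoBS]
      rw [if_neg]
      · have hrec := ih (d + 1) f (by omega) (by omega)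
        rw [pvF_succ, pvV_succ, hF] at hrec
        have hcast : ((d : Int) + 1) = (((d + 1 : Nat)) : Int) := by push_cast; ring
        rw [hcast]
        exact hrec
      · intro hc
        have : e ∈ pvF s d := by rw [hF]; exact List.mem_of_elem_eq_true hc
        exact hDmin d (by omega) (pvF_sub_pvV this)

-- ---------- the A inner loop vs the B inner loop ----------

lemma pvLineReadS_nonneg {line : Int → Int} {i : Int} (h : 0 ≤ i) :
    pvLineReadS line i = line i := by
  rw [pvLineReadS, if_neg (by omega)]

lemma stepA_enq {loc nex : Int} {qt : List Int} {line : Int → Int}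
    (hc : -1 < nex ∧ nex < 100001)
    (hcond : pvLineReadS line nex = 0 ∨ pvLineReadS line nex > pvLineReadS line loc + 1) :
    pvStepAS loc (qt, line) nex
      = (qt ++ [nex], fun j => if j = nex then pvLineReadS line loc + 1 else line j) := by
  unfold pvStepAS; dsimp only; rw [if_pos hc, if_pos hcond]

lemma stepA_skip_rng {loc nex : Int} {qt : List Int} {line : Int → Int}
    (hc : -1 < nex ∧ nex < 100001)
    (hcond : ¬ (pvLineReadS line nex = 0 ∨ pvLineReadS line nex > pvLineReadS line loc + 1)) :
    pvStepAS loc (qt, line) nex = (qt, line) := by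
  unfold pvStepAS; dsimp only; rw [if_pos hc, if_neg hcond]

lemma stepA_skip_out {loc nex : Int} {qt : List Int} {line : Int → Int}
    (hc : ¬ (-1 < nex ∧ nex < 100001)) :
    pvStepAS loc (qt, line) nex = (qt, line) := by
  unfold pvStepAS; dsimp only; rw [if_neg hc]

lemma stepB_skip {nex : Int} {vis acc : List Int}
    (h : ¬ ((0 ≤ nex ∧ nex < 100001) ∧ ¬ nex ∈ vis)) :
    pvStepBS (vis, acc) nex = (vis, acc) := by
  unfold pvStepBS; dsimp only; rw [if_neg h]

lemma stepB_enq {nex : Int} {vis acc : List Int}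
    (h1 : 0 ≤ nex ∧ nex < 100001) (h2 : nex ∉ vis) :
    pvStepBS (vis, acc) nex = (vis ++ [nex], acc ++ [nex]) := by
  unfold pvStepBS; dsimp only
  rw [if_pos ⟨h1, h2⟩, PySem.Set.add_of_not_mem h2]

/-- one level-`d` node's three neighbours, processed by A and by B in lockstep. -/
lemma inner3 (s loc : Int) (d : Nat) :
    ∀ (ns : List Int) (qt : List Int) (line : Int → Int) (vis acc : List Int),
    pvV s d ++ acc = vis →
    s ∉ acc →
    vis.Nodup →
    (∀ x ∈ vis, x = s ∨ pvRng x) →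
    (∀ x, x ≠ s → x ∉ vis → line x = 0) →
    (∀ en x, en ≤ d → x ∈ pvF s en → x ≠ s → line x = (en : Int)) →
    (∀ x ∈ acc, line x = (d : Int) + 1) →
    (line s = 0 ∨ (1 ≤ line s ∧ line s ≤ (d : Int) + 1)) →
    loc ∈ pvV s d → loc ≠ s → 0 ≤ loc →
    line loc = (d : Int) →
    ∃ (new mg : List Int) (line' : Int → Int),
      ns.foldl (pvStepAS loc) (qt, line) = (qt ++ mg, line') ∧
      ns.foldl pvStepBS (vis, acc) = (vis ++ new, acc ++ new) ∧
      ((mg = new ∧ line' s = line s) ∨ (line s = 0 ∧ pvIns s new mg ∧ line' s = (d : Int) + 1)) ∧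
      s ∉ new ∧
      (vis ++ new).Nodup ∧
      (∀ x ∈ vis ++ new, x = s ∨ pvRng x) ∧
      (∀ x, x ≠ s → x ∉ vis ++ new → line' x = 0) ∧
      (∀ en x, en ≤ d → x ∈ pvF s en → x ≠ s → line' x = (en : Int)) ∧
      (∀ x ∈ acc ++ new, line' x = (d : Int) + 1) ∧
      (line' s = 0 ∨ (1 ≤ line' s ∧ line' s ≤ (d : Int) + 1)) ∧
      line' loc = (d : Int) := by
  intro ns
  induction ns with
  | nil =>
    intro qt line vis acc hv hsacc hnd hrng H1 H2 H3 H4 hloc hlocs hloc0 hlocd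
    exact ⟨[], [], line, by simp, by simp, Or.inl ⟨rfl, rfl⟩, by simp, by simpa,
      by simpa using hrng, by simpa using H1, H2, by simpa using H3, H4, hlocd⟩
  | cons nex ns ih =>
    intro qt line vis acc hv hsacc hnd hrng H1 H2 H3 H4 hloc hlocs hloc0 hlocd
    have hsvis : s ∈ vis := by
      rw [← hv]; exact List.mem_append_left _ (s_mem_pvV s d)
    have hlocvis : loc ∈ vis := by
      rw [← hv]; exact List.mem_append_left _ hloc
    by_cases cA : -1 < nex ∧ nex < 100001
    · -- in range
      have hnex0 : 0 ≤ nex := by omega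
      by_cases hm : nex ∈ vis
      · -- already visited: B skips; A skips unless nex = s with line s = 0
        have hBstep : pvStepBS (vis, acc) nex = (vis, acc) :=
          stepB_skip (by push_neg; intro _; simpa using hm)
        by_cases hns : nex = s
        · rcases H4 with h4 | h4
          · -- the one re-enqueue of start
            have hAstep := stepA_enq (qt := qt) (line := line) (loc := loc) cA
              (Or.inl (by rw [pvLineReadS_nonneg hnex0, hns]; exact h4))
            set line₁ : Int → Int := fun j => if j = nex then pvLineReadS line loc + 1 else line j with hline₁
            have hl1v : line₁ nex = (d : Int) + 1 := by
              simp [hline₁, pvLineReadS_nonneg hloc0, hlocd]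
            have hl1o : ∀ j, j ≠ nex → line₁ j = line j := by
              intro j hj; simp [hline₁, hj]
            obtain ⟨new₁, mg₁, line'', hA, hB, halt, hsnew, hnd', hrng', H1', H2', H3', H4', hlocd'⟩ :=
              ih (qt ++ [nex]) line₁ vis acc hv hsacc hnd hrng
                (fun x hx1 hx2 => by rw [hl1o x (by rw [hns]; exact hx1)]; exact H1 x hx1 hx2)
                (fun en x hen hxe hxs => by rw [hl1o x (by rw [hns]; exact hxs)]; exact H2 en x hen hxe hxs)
                (fun x hx => by rw [hl1o x (fun h => hsacc ((hns ▸ h : x = s) ▸ hx))]; exact H3 x hx)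
                (Or.inr ⟨by rw [← hns, hl1v]; omega, by rw [← hns, hl1v]⟩)
                hloc hlocs hloc0 (by rw [hl1o loc (by rw [hns]; exact hlocs)]; exact hlocd)
            refine ⟨new₁, nex :: mg₁, line'', ?_, ?_, ?_, hsnew, hnd', hrng', H1', H2', H3', H4', hlocd'⟩
            · rw [List.foldl_cons, hAstep, hA]; simp
            · rw [List.foldl_cons, hBstep, hB]
            · rcases halt with ⟨heq, hls⟩ | ⟨hls, _, _⟩
              · refine Or.inr ⟨h4, ?_, by rw [hls, ← hns, hl1v]⟩
                rw [heq, hns]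
                exact pvIns_head
              · rw [← hns, hl1v] at hls; omega
          · -- start's line is already nonzero: A skips too
            have hAstep : pvStepAS loc (qt, line) nex = (qt, line) := by
              refine stepA_skip_rng cA ?_
              rw [pvLineReadS_nonneg hnex0, pvLineReadS_nonneg hloc0, hlocd, hns]
              push_neg
              exact ⟨by omega, by omega⟩
            obtain ⟨new₁, mg₁, line'', hA, hB, halt, hsnew, hnd', hrng', H1', H2', H3', H4', hlocd'⟩ :=
              ih qt line vis acc hv hsacc hnd hrng H1 H2 H3 (Or.inr h4) hloc hlocs hloc0 hlocd
            exact ⟨new₁, mg₁, line'', by rw [List.foldl_cons, hAstep]; exact hA,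
              by rw [List.foldl_cons, hBstep]; exact hB, halt, hsnew, hnd', hrng', H1', H2', H3', H4', hlocd'⟩
        · -- visited non-start node: its line value is its (positive) level; A skips
          have hval : (∃ en : Nat, 1 ≤ en ∧ en ≤ d ∧ line nex = (en : Int)) ∨ line nex = (d : Int) + 1 := by
            rw [← hv] at hm
            rcases List.mem_append.1 hm with hmV | hmA
            · obtain ⟨en, he1, he2, hxe⟩ := mem_pvV_level hmV hns
              exact Or.inl ⟨en, he1, he2, H2 en nex he2 hxe hns⟩
            · exact Or.inr (H3 nex hmA)
          have hAstep : pvStepAS loc (qt, line) nex = (qt, line) := by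
            refine stepA_skip_rng cA ?_
            rw [pvLineReadS_nonneg hnex0, pvLineReadS_nonneg hloc0, hlocd]
            push_neg
            rcases hval with ⟨en, he1, he2, hv'⟩ | hv' <;> rw [hv'] <;>
              exact ⟨by omega, by omega⟩
          obtain ⟨new₁, mg₁, line'', hA, hB, halt, hsnew, hnd', hrng', H1', H2', H3', H4', hlocd'⟩ :=
            ih qt line vis acc hv hsacc hnd hrng H1 H2 H3 H4 hloc hlocs hloc0 hlocd
          exact ⟨new₁, mg₁, line'', by rw [List.foldl_cons, hAstep]; exact hA,
            by rw [List.foldl_cons, hBstep]; exact hB, halt, hsnew, hnd', hrng', H1', H2', H3', H4', hlocd'⟩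
      · -- fresh node: both enqueue it
        have hns : nex ≠ s := fun h => hm (h ▸ hsvis)
        have hlz : line nex = 0 := H1 nex hns hm
        have hAstep := stepA_enq (qt := qt) (line := line) (loc := loc) cA
          (Or.inl (by rw [pvLineReadS_nonneg hnex0]; exact hlz))
        have hBstep : pvStepBS (vis, acc) nex = (vis ++ [nex], acc ++ [nex]) :=
          stepB_enq ⟨by omega, by omega⟩ hm
        set line₁ : Int → Int := fun j => if j = nex then pvLineReadS line loc + 1 else line j with hline₁
        have hl1v : line₁ nex = (d : Int) + 1 := by
          simp [hline₁, pvLineReadS_nonneg hloc0, hlocd]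
        have hl1o : ∀ j, j ≠ nex → line₁ j = line j := by
          intro j hj; simp [hline₁, hj]
        have hFsub : ∀ en x, en ≤ d → x ∈ pvF s en → x ∈ vis := by
          intro en x hen hxe
          rw [← hv]
          exact List.mem_append_left _ (pvV_mono hen (pvF_sub_pvV hxe))
        obtain ⟨new₁, mg₁, line'', hA, hB, halt, hsnew, hnd', hrng', H1', H2', H3', H4', hlocd'⟩ :=
          ih (qt ++ [nex]) line₁ (vis ++ [nex]) (acc ++ [nex])
            (by rw [← hv]; simp)
            (by simp only [List.mem_append, List.mem_singleton]; push_neg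
                exact ⟨hsacc, fun h => hns h.symm⟩)
            (by rw [List.nodup_append]
                refine ⟨hnd, by simp, ?_⟩
                intro a ha b hb heq
                simp only [List.mem_singleton] at hb
                exact hm ((heq.trans hb) ▸ ha))
            (by intro x hx
                rcases List.mem_append.1 hx with hx | hx
                · exact hrng x hx
                · simp only [List.mem_singleton] at hx; subst hx
                  exact Or.inr ⟨by omega, by omega⟩)
            (by intro x hx1 hx2
                have hxnex : x ≠ nex := by
                  intro h; exact hx2 (h ▸ List.mem_append_right _ (by simp))
                rw [hl1o x hxnex]
                exact H1 x hx1 (fun h => hx2 (List.mem_append_left _ h)))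
            (by intro en x hen hxe hxs
                have hxnex : x ≠ nex := fun h => hm (h ▸ hFsub en x hen hxe)
                rw [hl1o x hxnex]; exact H2 en x hen hxe hxs)
            (by intro x hx
                rcases List.mem_append.1 hx with hxa | hxa
                · have hxnex : x ≠ nex := by
                    intro h
                    rw [h] at hxa
                    exact hm (by rw [← hv]; exact List.mem_append_right _ hxa)
                  rw [hl1o x hxnex]; exact H3 x hxa
                · simp only [List.mem_singleton] at hxa; subst hxa; exact hl1v)
            (by rw [hl1o s (fun h => hns h.symm)]; exact H4)
            hloc hlocs hloc0 (by rw [hl1o loc (fun h => hm (h ▸ hlocvis))]; exact hlocd)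
        refine ⟨nex :: new₁, nex :: mg₁, line'', ?_, ?_, ?_, ?_, ?_, ?_, ?_, H2', ?_, H4', hlocd'⟩
        · rw [List.foldl_cons, hAstep, hA]; simp
        · rw [List.foldl_cons, hBstep, hB]; simp
        · rcases halt with ⟨heq, hls⟩ | ⟨hls, hins, hls'⟩
          · exact Or.inl ⟨by rw [heq], by rw [hls, hl1o s (fun h => hns h.symm)]⟩
          · rw [hl1o s (fun h => hns h.symm)] at hls
            exact Or.inr ⟨hls, pvIns_cons hins, hls'⟩
        · simp only [List.mem_cons]; push_neg
          exact ⟨fun h => hns h.symm, hsnew⟩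
        · simpa using hnd'
        · intro x hx; exact hrng' x (by simpa using hx)
        · intro x hx1 hx2; exact H1' x hx1 (by simpa using hx2)
        · intro x hx; exact H3' x (by simpa using hx)
    · -- out of range: both skip
      have hAstep : pvStepAS loc (qt, line) nex = (qt, line) := stepA_skip_out cA
      have hBstep : pvStepBS (vis, acc) nex = (vis, acc) :=
        stepB_skip (by intro h; exact cA ⟨by omega, h.1.2⟩)
      obtain ⟨new₁, mg₁, line'', hA, hB, halt, hsnew, hnd', hrng', H1', H2', H3', H4', hlocd'⟩ :=
        ih qt line vis acc hv hsacc hnd hrng H1 H2 H3 H4 hloc hlocs hloc0 hlocd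
      exact ⟨new₁, mg₁, line'', by rw [List.foldl_cons, hAstep]; exact hA,
        by rw [List.foldl_cons, hBstep]; exact hB, halt, hsnew, hnd', hrng', H1', H2', H3', H4', hlocd'⟩

-- ---------- the A main loop, level by level ----------

lemma pvIns_prepend {s : Int} {l l' m : List Int} (h : pvIns s l l') :
    pvIns s (m ++ l) (m ++ l') := by
  obtain ⟨a, b, h1, h2⟩ := h
  exact ⟨m ++ a, b, by simp [h1], by simp [h2]⟩

lemma pvIns_length {s : Int} {l l' : List Int} (h : pvIns s l l') :
    l'.length = l.length + 1 := by
  obtain ⟨a, b, h1, h2⟩ := h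
  subst h1; subst h2
  simp
  omega

lemma pvIns_nonempty {s : Int} {l l' : List Int} (h : pvIns s l l') : l' ≠ [] := by
  obtain ⟨a, b, _, h2⟩ := h
  cases a <;> simp [h2]

lemma goA_succ (f : Nat) (loc : Int) (rest : List Int) (line : Int → Int) (e : Int) :
    pvGoAS (f + 1) (loc :: rest) line e =
      if loc = e then some (pvLineReadS line loc)
      else
        (let ql := [loc + 1, loc - 1, loc * 2].foldl (pvStepAS loc) (rest, line)
         pvGoAS f ql.1 ql.2 e) := rfl

/-- an inert pop of the re-enqueued start: all three neighbours are skipped. -/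
lemma padPop (s : Int) (d : Nat) (line : Int → Int) (q : List Int)
    (hd1 : 1 ≤ d)
    (hval1 : ∀ x, x ∈ pvV s 1 → x ≠ s → line x = 1)
    (hnn : ∀ x, x ≠ s → 0 ≤ line x)
    (hls : 1 ≤ line s) :
    [s + 1, s - 1, s * 2].foldl (pvStepAS s) (q, line) = (q, line) := by
  have hread : 0 ≤ pvLineReadS line s := by
    rw [pvLineReadS]
    split
    · exact hnn _ (by omega)
    · omega
  have hstep : ∀ nex, (nex = s + 1 ∨ nex = s - 1 ∨ nex = s * 2) →
      pvStepAS s (q, line) nex = (q, line) := by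
    intro nex hn
    by_cases hr : -1 < nex ∧ nex < 100001
    · refine stepA_skip_rng hr ?_
      rw [pvLineReadS_nonneg (by omega)]
      by_cases hnsx : nex = s
      · rw [hnsx, pvLineReadS]
        rw [if_neg (by omega)]
        push_neg
        constructor <;> omega
      · have hv1 : nex ∈ pvV s 1 := by
          refine pvV_closure (x := s) (s_mem_pvV s 0) ?_ ⟨by omega, by omega⟩
          rcases hn with rfl | rfl | rfl <;> simp
        rw [hval1 nex hv1 hnsx]
        push_neg
        constructor <;> omega
    · exact stepA_skip_out hr
  rw [List.foldl_cons, hstep _ (Or.inl rfl), List.foldl_cons, hstep _ (Or.inr (Or.inl rfl)),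
    List.foldl_cons, hstep _ (Or.inr (Or.inr rfl)), List.foldl_nil]

/-- the statement of the within-level simulation of A at level `d`. -/
def AStmt (s e : Int) (D d : Nat) : Prop :=
  ∀ (r : List Int) (fuel : Nat) (pre suf n : List Int) (line : Int → Int) (vis acc : List Int),
    pvF s d = pre ++ suf →
    (d = D → e ∈ suf) →
    pvLevelBS pre (pvV s d) = (vis, acc) →
    pvV s d ++ acc = vis →
    s ∉ acc →
    vis.Nodup →
    (∀ x ∈ vis, x = s ∨ pvRng x) →
    (∀ x, x ≠ s → x ∉ vis → line x = 0) →
    (∀ en x, en ≤ d → x ∈ pvF s en → x ≠ s → line x = (en : Int)) →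
    (∀ x ∈ acc, line x = (d : Int) + 1) →
    (line s = 0 ∨ (1 ≤ line s ∧ line s ≤ (d : Int) + 1)) →
    ((r = suf ∧ (n = acc ∨ pvIns s acc n)) ∨ (pvIns s suf r ∧ n = acc)) →
    ((pvIns s acc n ∨ pvIns s suf r) → 1 ≤ line s) →
    ((fuel : Int) ≥ (r.length : Int) + (n.length : Int) + ((100003 : Int) - (vis.length : Int))
        + (if line s = 0 then (1 : Int) else 0)) →
    pvGoAS fuel (r ++ n) line e = some ((D : Nat) : Int)

lemma innerStep (s e : Int) (D : Nat) (hse : s ≠ e)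
    (hDmin : ∀ k, k < D → e ∉ pvV s k) (d : Nat) (hd1 : 1 ≤ d) (hdD : d ≤ D)
    (hDF : e ∈ pvF s D)
    (hnext : d < D → AStmt s e D (d + 1)) : AStmt s e D d := by
  unfold AStmt
  intro r
  induction r with
  | nil =>
    intro fuel pre suf n line vis acc hsplit hsufD hBmid hv hsacc hnd hrng H1 H2 H3 H4 QInv Hpad hfuel
    rcases QInv with ⟨hr, hncase⟩ | ⟨hins, _⟩
    · have hsufnil : suf = [] := hr.symm
      subst hsufnil
      have hdlt : d < D := by
        rcases Nat.lt_or_ge d D with h | h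
        · exact h
        · have : d = D := by omega
          exact absurd (hsufD this) (by simp)
      have hpre : pvF s d = pre := by simpa using hsplit
      have hvis : vis = pvV s (d + 1) := by
        rw [pvV_succ, hpre, hBmid]
      have hacc : acc = pvF s (d + 1) := by
        rw [pvF_succ, hpre, hBmid]
      have hgoal := hnext hdlt n fuel [] (pvF s (d + 1)) [] line (pvV s (d + 1)) []
        (by simp)
        (fun h => h ▸ hDF)
        rfl
        (by simp)
        (by simp)
        (hvis ▸ hnd)
        (fun x hx => hrng x (hvis ▸ hx))
        (fun x hx1 hx2 => H1 x hx1 (fun hc => hx2 (hvis ▸ hc)))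
        (by
          intro en x hen hxe hxs
          rcases Nat.lt_or_ge en (d + 1) with h' | h'
          · exact H2 en x (by omega) hxe hxs
          · have hen' : en = d + 1 := by omega
            subst hen'
            have : line x = (d : Int) + 1 := H3 x (by rw [hacc]; exact hxe)
            rw [this]; push_cast; ring)
        (by simp)
        (by
          rcases H4 with h | h
          · exact Or.inl h
          · refine Or.inr ⟨h.1, ?_⟩; push_cast; omega)
        (by
          rcases hncase with hn | hn
          · exact Or.inl ⟨by rw [hn, hacc], Or.inl rfl⟩
          · exact Or.inr ⟨by rw [← hacc]; exact hn, rfl⟩)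
        (by
          intro h
          rcases h with h | h
          · exact (pvIns_nonempty h rfl).elim
          · exact Hpad (Or.inl (by rw [hacc]; exact h)))
        (by
          rw [← hvis]
          simp only [List.length_nil] at hfuel ⊢
          omega)
      simpa using hgoal
    · exact (pvIns_nonempty hins rfl).elim
  | cons rh r' ih =>
    intro fuel pre suf n line vis acc hsplit hsufD hBmid hv hsacc hnd hrng H1 H2 H3 H4 QInv Hpad hfuel
    have hvlen : vis.length ≤ 100002 := pvVis_len hnd hrng
    obtain ⟨f, rfl⟩ : ∃ f, fuel = f + 1 := by
      refine ⟨fuel - 1, ?_⟩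
      have h1 : (1 : Int) ≤ fuel := by
        split_ifs at hfuel <;> simp only [List.length_cons] at hfuel <;> push_cast at hfuel <;> omega
      omega
    have hconsapp : (rh :: r') ++ n = rh :: (r' ++ n) := rfl
    rw [hconsapp]
    -- the shared "pop a fresh level-d node" argument
    have freshCase : ∀ suft, suf = rh :: suft →
        ((r' = suft ∧ (n = acc ∨ pvIns s acc n)) ∨ (pvIns s suft r' ∧ n = acc)) →
        pvGoAS (f + 1) (rh :: (r' ++ n)) line e = some ((D : Nat) : Int) := by
      intro suft hsufteq hrel
      have hrhF : rh ∈ pvF s d := by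
        rw [hsplit, hsufteq]
        exact List.mem_append_right _ (by simp)
      obtain ⟨dd, rfl⟩ : ∃ dd, d = dd + 1 := ⟨d - 1, by omega⟩
      have hrng_rh : pvRng rh := (pvF_fresh hrhF).1
      have hrs : rh ≠ s := pvF_ne_s hrhF
      have hrhV : rh ∈ pvV s (dd + 1) := pvF_sub_pvV hrhF
      have hlrh : line rh = ((dd + 1 : Nat) : Int) := H2 (dd + 1) rh le_rfl hrhF hrs
      by_cases hre : rh = e
      · have hdD' : dd + 1 = D := by
          by_contra hne
          exact hDmin (dd + 1) (by omega) (hre ▸ hrhV)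
        rw [goA_succ, if_pos hre]
        rw [pvLineReadS_nonneg hrng_rh.1, hlrh, hdD']
      · obtain ⟨new, mg, line', hA, hB, halt, hsnew, hnd', hrng', H1', H2', H3', H4', hlocd'⟩ :=
          inner3 s rh (dd + 1) [rh + 1, rh - 1, rh * 2] (r' ++ n) line vis acc
            hv hsacc hnd hrng H1 H2 H3 H4 hrhV hrs hrng_rh.1 hlrh
        rw [goA_succ, if_neg hre]
        simp only [hA]
        rw [show (r' ++ n) ++ mg = r' ++ (n ++ mg) from by simp]
        have hBmid' : pvLevelBS (pre ++ [rh]) (pvV s (dd + 1)) = (vis ++ new, acc ++ new) := by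
          unfold pvLevelBS at hBmid ⊢
          rw [List.foldl_append, hBmid, List.foldl_cons, List.foldl_nil, hB]
        refine ih f (pre ++ [rh]) suft (n ++ mg) line' (vis ++ new) (acc ++ new)
          (by rw [hsplit, hsufteq]; simp) ?_ hBmid'
          (by rw [← List.append_assoc, hv]) (by simp [hsacc, hsnew])
          hnd' hrng' H1' H2' H3' H4' ?_ ?_ ?_
        · intro h
          have := hsufD h
          rw [hsufteq] at this
          rcases List.mem_cons.1 this with h' | h'
          · exact absurd h'.symm hre
          · exact h'
        · -- queue relation
          rcases hrel with ⟨hr'eq, hncase⟩ | ⟨hins', hneq'⟩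
          · rcases hncase with hn | hn
            · rcases halt with ⟨hmg, _⟩ | ⟨_, hinsmg, _⟩
              · exact Or.inl ⟨hr'eq, Or.inl (by rw [hn, hmg])⟩
              · exact Or.inl ⟨hr'eq, Or.inr (by rw [hn]; exact pvIns_prepend hinsmg)⟩
            · have hls1 : 1 ≤ line s := Hpad (Or.inl hn)
              rcases halt with ⟨hmg, _⟩ | ⟨hls0, _, _⟩
              · exact Or.inl ⟨hr'eq, Or.inr (by rw [hmg]; exact pvIns_append hn)⟩
              · omega
          · have hls1 : 1 ≤ line s := by
              refine Hpad (Or.inr ?_)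
              rw [hsufteq]
              exact pvIns_cons hins'
            rcases halt with ⟨hmg, _⟩ | ⟨hls0, _, _⟩
            · exact Or.inr ⟨hins', by rw [hneq', hmg]⟩
            · omega
        · -- pad implies positive line s
          intro h
          rcases halt with ⟨hmg, hls'⟩ | ⟨hls0, hinsmg, hls'⟩
          · rw [hls']
            rcases hrel with ⟨hr'eq, hncase⟩ | ⟨hins', hneq'⟩
            · rcases hncase with hn | hn
              · -- no old pad; then no pad now either
                exfalso
                rcases h with h | h
                · rw [hn, hmg] at h
                  exact pvIns_ne_self h
                · rw [hr'eq] at h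
                  exact pvIns_ne_self h
              · exact Hpad (Or.inl hn)
            · exact Hpad (Or.inr (by rw [hsufteq]; exact pvIns_cons hins'))
          · rw [hls']
            push_cast
            omega
        · -- fuel
          rcases halt with ⟨hmg, hls'⟩ | ⟨hls0, hinsmg, hls'⟩
          · have hmglen : mg.length = new.length := by rw [hmg]
            rw [hls']
            simp only [List.length_cons, List.length_append] at hfuel ⊢
            split_ifs at hfuel ⊢ <;> push_cast at hfuel ⊢ <;> omega
          · have hmglen : mg.length = new.length + 1 := pvIns_length hinsmg
            have hlneg : ¬ (line' s = 0) := by rw [hls']; push_cast; omega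
            rw [if_pos hls0] at hfuel
            rw [if_neg hlneg]
            simp only [List.length_cons, List.length_append] at hfuel ⊢
            push_cast at hfuel ⊢
            omega
    rcases QInv with ⟨hr, hncase⟩ | ⟨⟨a, b, hab1, hab2⟩, hneq⟩
    · exact freshCase r' hr.symm (Or.inl ⟨rfl, hncase⟩)
    · cases a with
      | cons ah a' =>
        have hrh : rh = ah := by simpa using congrArg (fun l => l.headI) hab2
        have hr' : r' = a' ++ s :: b := by
          have := congrArg List.tail hab2
          simpa using this
        refine freshCase (a' ++ b) (by rw [hab1, ← hrh]; rfl) ?_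
        exact Or.inr ⟨⟨a', b, rfl, hr'⟩, hneq⟩
      | nil =>
        -- pad pop
        have hrh : rh = s := by simpa using congrArg (fun l => l.headI) hab2
        have hr' : r' = b := by
          have := congrArg List.tail hab2
          simpa using this
        have hsufb : suf = b := by simpa using hab1
        have hls1 : 1 ≤ line s := Hpad (Or.inr ⟨[], b, hab1, by rw [hab2]⟩)
        rw [goA_succ, if_neg (by rw [hrh]; exact hse)]
        have hval1 : ∀ x, x ∈ pvV s 1 → x ≠ s → line x = 1 := by
          intro x hx hxs
          obtain ⟨en, he1, he2, hxe⟩ := mem_pvV_level hx hxs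
          have hen : en = 1 := by omega
          subst hen
          have := H2 1 x (by omega) hxe hxs
          simpa using this
        have hnn : ∀ x, x ≠ s → 0 ≤ line x := by
          intro x hxs
          by_cases hxv : x ∈ vis
          · rw [← hv] at hxv
            rcases List.mem_append.1 hxv with hx | hx
            · obtain ⟨en, _, _, hxe⟩ := mem_pvV_level hx hxs
              rw [H2 en x (by omega) hxe hxs]
              positivity
            · rw [H3 x hx]; positivity
          · rw [H1 x hxs hxv]
        simp only [hrh]
        rw [padPop s d line (r' ++ n) hd1 hval1 hnn (by rw [← hrh] at hls1; rw [hrh] at hls1; exact hls1)]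
        refine ih f pre suf n line vis acc hsplit hsufD hBmid hv hsacc hnd hrng H1 H2 H3 H4 ?_ ?_ ?_
        · exact Or.inl ⟨by rw [hr', hsufb], Or.inl hneq⟩
        · exact fun _ => hls1
        · simp only [List.length_cons] at hfuel ⊢
          split_ifs at hfuel ⊢ <;> push_cast at hfuel ⊢ <;> omega

lemma levelsA (s e : Int) (D : Nat) (hse : s ≠ e)
    (hDmin : ∀ k, k < D → e ∉ pvV s k) (hDF : e ∈ pvF s D) :
    ∀ gap d, 1 ≤ d → d + gap = D → AStmt s e D d := by
  intro gap
  induction gap with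
  | zero =>
    intro d hd1 hd
    exact innerStep s e D hse hDmin d hd1 (by omega) hDF (fun h => absurd h (by omega))
  | succ gap igh =>
    intro d hd1 hd
    exact innerStep s e D hse hDmin d hd1 (by omega) hDF
      (fun _ => igh (d + 1) (by omega) (by omega))

-- ---------- the first pop (level 0), for s ≠ 0 ----------

lemma inner0 (s : Int) (hs0 : s ≠ 0) (hsr : s = -1 ∨ 0 ≤ s) :
    ∀ (ns : List Int) (q : List Int) (line : Int → Int) (acc : List Int),
    (∀ nex ∈ ns, nex = s + 1 ∨ nex = s - 1 ∨ nex = s * 2) →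
    (∀ x ∈ acc, (x = s + 1 ∨ x = s - 1 ∨ x = s * 2) ∧ pvRng x) →
    acc.Nodup → s ∉ acc →
    (∀ x ∈ acc, line x = 1) →
    (∀ x, x ∉ acc → line x = 0) →
    ∃ new line',
      ns.foldl (pvStepAS s) (q, line) = (q ++ new, line') ∧
      ns.foldl pvStepBS (s :: acc, acc) = ((s :: acc) ++ new, acc ++ new) ∧
      (∀ x ∈ acc ++ new, (x = s + 1 ∨ x = s - 1 ∨ x = s * 2) ∧ pvRng x) ∧
      (acc ++ new).Nodup ∧ s ∉ acc ++ new ∧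
      (∀ x ∈ acc ++ new, line' x = 1) ∧
      (∀ x, x ∉ acc ++ new → line' x = 0) := by
  intro ns
  induction ns with
  | nil =>
    intro q line acc hns hacc hndacc hsacc hline1 hline0
    exact ⟨[], line, by simp, by simp, by simpa using hacc, by simpa using hndacc,
      by simpa using hsacc, by simpa using hline1, by simpa using hline0⟩
  | cons nex ns ih =>
    intro q line acc hns hacc hndacc hsacc hline1 hline0
    have hnsrest : ∀ x ∈ ns, x = s + 1 ∨ x = s - 1 ∨ x = s * 2 :=
      fun x hx => hns x (List.mem_cons_of_mem _ hx)
    have hnshead : nex = s + 1 ∨ nex = s - 1 ∨ nex = s * 2 := hns nex (by simp)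
    have hread : pvLineReadS line s = 0 := by
      rw [pvLineReadS]
      split
      · have hs1 : s = -1 := by rcases hsr with h | h <;> omega
        refine hline0 _ ?_
        intro hc
        rcases (hacc _ hc).1 with h | h | h <;> omega
      · exact hline0 s hsacc
    by_cases hr : -1 < nex ∧ nex < 100001
    · have hnexs : nex ≠ s := by rcases hnshead with rfl | rfl | rfl <;> omega
      have hnex0 : 0 ≤ nex := by omega
      by_cases hm : nex ∈ acc
      · -- already enqueued at this level
        have hAstep : pvStepAS s (q, line) nex = (q, line) := by
          refine stepA_skip_rng hr ?_
          rw [pvLineReadS_nonneg hnex0, hline1 nex hm, hread]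
          push_neg
          constructor <;> omega
        have hBstep : pvStepBS (s :: acc, acc) nex = (s :: acc, acc) := by
          refine stepB_skip ?_
          push_neg
          intro _
          simp [hm]
        obtain ⟨new₁, line'', hA, hB, hacc', hnd', hsacc', hl1', hl0'⟩ :=
          ih q line acc hnsrest hacc hndacc hsacc hline1 hline0
        exact ⟨new₁, line'', by rw [List.foldl_cons, hAstep]; exact hA,
          by rw [List.foldl_cons, hBstep]; exact hB, hacc', hnd', hsacc', hl1', hl0'⟩
      · -- fresh
        have hAstep := stepA_enq (qt := q) (line := line) (loc := s) hr
          (Or.inl (by rw [pvLineReadS_nonneg hnex0]; exact hline0 nex hm))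
        have hBstep : pvStepBS (s :: acc, acc) nex = ((s :: acc) ++ [nex], acc ++ [nex]) :=
          stepB_enq ⟨by omega, by omega⟩ (by simp; push_neg; exact ⟨fun h => hnexs h, hm⟩)
        set line₁ : Int → Int := fun j => if j = nex then pvLineReadS line s + 1 else line j with hline₁
        have hl1v : line₁ nex = 1 := by simp [hline₁, hread]
        have hl1o : ∀ j, j ≠ nex → line₁ j = line j := by
          intro j hj; simp [hline₁, hj]
        obtain ⟨new₁, line'', hA, hB, hacc', hnd', hsacc', hl1', hl0'⟩ :=
          ih (q ++ [nex]) line₁ (acc ++ [nex])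
            hnsrest
            (by intro x hx
                rcases List.mem_append.1 hx with hx | hx
                · exact hacc x hx
                · simp only [List.mem_singleton] at hx; subst hx
                  exact ⟨hnshead, by omega, by omega⟩)
            (by rw [List.nodup_append]
                refine ⟨hndacc, by simp, ?_⟩
                intro a ha b hb heq
                simp only [List.mem_singleton] at hb
                exact hm ((heq.trans hb) ▸ ha))
            (by simp only [List.mem_append, List.mem_singleton]; push_neg
                exact ⟨hsacc, fun h => hnexs h.symm⟩)
            (by intro x hx
                rcases List.mem_append.1 hx with hx | hx
                · rw [hl1o x (fun h => hm (h ▸ hx))]; exact hline1 x hx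
                · simp only [List.mem_singleton] at hx; subst hx; exact hl1v)
            (by intro x hx
                have hxnex : x ≠ nex := fun h => hx (h ▸ List.mem_append_right _ (by simp))
                rw [hl1o x hxnex]
                exact hline0 x (fun h => hx (List.mem_append_left _ h)))
        refine ⟨nex :: new₁, line'', ?_, ?_, ?_, ?_, ?_, ?_, ?_⟩
        · rw [List.foldl_cons, hAstep, hA]; simp
        · rw [List.foldl_cons, hBstep, List.cons_append, hB]; simp
        · intro x hx; exact hacc' x (by simpa using hx)
        · simpa using hnd'
        · simpa using hsacc'
        · intro x hx; exact hl1' x (by simpa using hx)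
        · intro x hx; exact hl0' x (by simpa using hx)
    · have hAstep : pvStepAS s (q, line) nex = (q, line) := stepA_skip_out hr
      have hBstep : pvStepBS (s :: acc, acc) nex = (s :: acc, acc) :=
        stepB_skip (by intro h; exact hr ⟨by omega, h.1.2⟩)
      obtain ⟨new₁, line'', hA, hB, hacc', hnd', hsacc', hl1', hl0'⟩ :=
        ih q line acc hnsrest hacc hndacc hsacc hline1 hline0
      exact ⟨new₁, line'', by rw [List.foldl_cons, hAstep]; exact hA,
        by rw [List.foldl_cons, hBstep]; exact hB, hacc', hnd', hsacc', hl1', hl0'⟩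

-- ---------- assembling the two ports ----------

lemma goB_succ (f : Nat) (x : Int) (rest : List Int) (vis : List Int) (depth e : Int) :
    pvGoBS (f + 1) (x :: rest) vis depth e =
      if (x :: rest).contains e then some depth
      else
        (let vb := pvLevelBS (x :: rest) vis
         pvGoBS f vb.2 vb.1 (depth + 1) e) := rfl

lemma pvLineReadS_zero (i : Int) : pvLineReadS (fun _ => (0 : Int)) i = 0 := by
  rw [pvLineReadS]; split <;> rfl

/-- A and B agree when start = end (both return 0). -/
lemma main_eq (s : Int) : bfs s s = bfs_alt s s := by
  rw [bfs_eq_S, bfs_alt_eq_S]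
  rw [show (1000000 : Nat) = 999999 + 1 by norm_num]
  rw [goA_succ, if_pos rfl, goB_succ, if_pos (by simp)]
  simp [pvLineReadS_zero]

/-- A and B agree when start ≠ end, on the admitted domain: both return the
BFS distance. -/
lemma main_ne (s e : Int) (hse : s ≠ e) (he0 : 0 ≤ e) (he1 : e ≤ 100000)
    (hs : -1 ≤ s) (hs1 : s ≤ 100000) : bfs s e = bfs_alt s e := by
  have hreach : e ∈ pvV s 100001 := pvV_reach hs hs1 he0 he1
  have hex : ∃ d, e ∈ pvV s d := ⟨100001, hreach⟩
  set D := Nat.find hex with hD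
  have hDV : e ∈ pvV s D := Nat.find_spec hex
  have hDmin : ∀ k, k < D → e ∉ pvV s k := fun k hk => Nat.find_min hex hk
  have hDle : D ≤ 100001 := Nat.find_min' hex hreach
  have hD1 : 1 ≤ D := by
    rcases Nat.eq_zero_or_pos D with h | h
    · exfalso
      rw [h, pvV_zero] at hDV
      simp at hDV
      exact hse hDV.symm
    · exact h
  have hDF : e ∈ pvF s D := by
    obtain ⟨k, hk⟩ : ∃ k, D = k + 1 := ⟨D - 1, by omega⟩
    rw [hk, pvV_decomp] at hDV
    rcases List.mem_append.1 hDV with h | h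
    · exact absurd h (hDmin k (by omega))
    · rw [hk]; exact h
  have hBside : bfs_alt s e = ((D : Nat) : Int) := by
    rw [bfs_alt_eq_S]
    rw [show PySem.Set.ofList [s] = [s] from PySem.Set.ofList_eq_self_of_nodup _ (by simp)]
    have hrun := goB_run hDF hDmin D 0 1000000 (by omega) (by omega)
    rw [pvF_zero, pvV_zero] at hrun
    rw [show ((0 : Nat) : Int) = 0 from rfl] at hrun
    rw [hrun]
    rfl
  have hAside : bfs s e = ((D : Nat) : Int) := by
    rw [bfs_eq_S]
    rw [show (1000000 : Nat) = 999999 + 1 by norm_num]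
    rw [goA_succ, if_neg hse]
    by_cases hs0 : s = 0
    · -- start = 0: the first pop re-enqueues 0 itself
      subst hs0
      have hrw : [(0 : Int) + 1, 0 - 1, 0 * 2] = [1, -1, 0] := by norm_num
      rw [hrw]
      have hA1 := stepA_enq (loc := (0 : Int)) (nex := 1) (qt := ([] : List Int))
        (line := fun _ => (0 : Int)) ⟨by norm_num, by norm_num⟩ (Or.inl (by rw [pvLineReadS_zero]))
      set l1 : Int → Int := fun j => if j = 1 then pvLineReadS (fun _ => (0 : Int)) 0 + 1 else 0 with hl1def
      have hl1 : ∀ j, l1 j = if j = 1 then 1 else 0 := by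
        intro j; simp only [hl1def, pvLineReadS_zero]; norm_num
      have hA2 : pvStepAS 0 (([] : List Int) ++ [1], l1) (-1) = (([] : List Int) ++ [1], l1) :=
        stepA_skip_out (by norm_num)
      have hA3 := stepA_enq (loc := (0 : Int)) (nex := 0) (qt := ([] : List Int) ++ [1])
        (line := l1) ⟨by norm_num, by norm_num⟩
        (Or.inl (by rw [pvLineReadS_nonneg le_rfl, hl1]; norm_num))
      set line2 : Int → Int := fun j => if j = 0 then pvLineReadS l1 0 + 1 else l1 j with hline2def
      have hline2 : ∀ j, line2 j = if j = 0 then 1 else if j = 1 then 1 else 0 := by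
        intro j
        rw [hline2def]
        rw [pvLineReadS_nonneg le_rfl, hl1]
        norm_num
        split <;> rfl
      have hfold : [(1 : Int), -1, 0].foldl (pvStepAS 0) (([] : List Int), fun _ => (0 : Int))
          = (([] : List Int) ++ [1] ++ [0], line2) := by
        rw [List.foldl_cons, hA1, List.foldl_cons, hA2, List.foldl_cons, hA3, List.foldl_nil]
      rw [hfold]
      have hF1 : pvF 0 1 = [1] := by decide
      have hV1 : pvV 0 1 = [0, 1] := by decide
      have hrun := levelsA 0 e D hse hDmin hDF (D - 1) 1 le_rfl (by omega)
        [1] 999999 [] [1] [0] line2 [0, 1] []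
        (by rw [hF1]; rfl)
        (fun h => by rw [← h] at hDF; rw [hF1] at hDF; exact hDF)
        (by rw [hV1]; rfl)
        (by rw [hV1]; rfl)
        (by simp)
        (by norm_num)
        (by intro x hx; right; rcases List.mem_cons.1 hx with rfl | hx
            · exact ⟨le_rfl, by norm_num⟩
            · simp at hx; subst hx; exact ⟨by norm_num, by norm_num⟩)
        (by intro x hx1 hx2
            rw [hline2]
            rw [if_neg hx1, if_neg (by intro h; exact hx2 (by rw [h]; simp))])
        (by intro en x hen hxe hxs
            interval_cases en
            · rw [pvF_zero] at hxe; simp at hxe; exact absurd hxe hxs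
            · rw [hF1] at hxe; simp at hxe; subst hxe
              rw [hline2]; norm_num)
        (by simp)
        (by rw [hline2]; norm_num)
        (Or.inl ⟨rfl, Or.inr ⟨[], [], rfl, rfl⟩⟩)
        (fun _ => by rw [hline2]; norm_num)
        (by rw [hline2]
            norm_num)
      have : ([] : List Int) ++ [1] ++ [0] = [1] ++ [0] := by simp
      rw [this]
      rw [hrun]
      rfl
    · -- start ≠ 0: a clean first level
      have hsr : s = -1 ∨ 0 ≤ s := by omega
      obtain ⟨new, line', hA, hB, haccp, hndp, hsaccp, hl1, hl0⟩ :=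
        inner0 s hs0 hsr [s + 1, s - 1, s * 2] [] (fun _ => (0 : Int)) []
          (by intro x hx; simpa using hx)
          (by simp)
          (by simp)
          (by simp)
          (by simp)
          (fun _ _ => rfl)
      simp only [List.nil_append] at hA hB haccp hndp hsaccp hl1 hl0
      have hF1 : pvF s 1 = new := by
        rw [pvF_succ, pvF_zero, pvV_zero]
        unfold pvLevelBS
        rw [List.foldl_cons, List.foldl_nil]
        rw [hB]
      have hV1 : pvV s 1 = s :: new := by
        rw [pvV_succ, pvF_zero, pvV_zero]
        unfold pvLevelBS
        rw [List.foldl_cons, List.foldl_nil]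
        rw [hB]
        simp
      have hrun := levelsA s e D hse hDmin hDF (D - 1) 1 le_rfl (by omega)
        new 999999 [] new [] line' (s :: new) []
        (by rw [hF1]; rfl)
        (fun h => by rw [← h] at hDF; rw [hF1] at hDF; exact hDF)
        (by rw [hV1]; rfl)
        (by rw [hV1]; simp)
        (by simp)
        (List.nodup_cons.2 ⟨hsaccp, hndp⟩)
        (by intro x hx
            rcases List.mem_cons.1 hx with rfl | hx
            · exact Or.inl rfl
            · exact Or.inr (haccp x hx).2)
        (by intro x hx1 hx2
            exact hl0 x (fun h => hx2 (List.mem_cons_of_mem _ h)))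
        (by intro en x hen hxe hxs
            interval_cases en
            · rw [pvF_zero] at hxe; simp at hxe; exact absurd hxe hxs
            · rw [hF1] at hxe
              rw [hl1 x hxe]; rfl)
        (by simp)
        (Or.inl (hl0 s hsaccp))
        (Or.inl ⟨rfl, Or.inl rfl⟩)
        (by intro h
            exfalso
            rcases h with h | h
            · exact pvIns_nonempty h rfl
            · exact pvIns_ne_self h)
        (by rw [hl0 s hsaccp]
            simp only [List.length_cons, List.length_nil]
            push_cast
            omega)
      rw [hA]
      simp only [List.append_nil] at hrun
      rw [hrun]
      rfl
  rw [hAside, hBside]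

-- ===== VERDICT (by name: the statement is the Claim_ definition above) =====

theorem bfs_spec : Claim_equal_bfs := by
  intro s e _ hpre
  unfold Spec_bfs
  rcases hpre with ⟨heq, _, _⟩ | ⟨hse, he0, he1, hs, hs1⟩
  · subst heq
    exact main_eq s
  · exact main_ne s e hse he0 he1 hs hs1
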